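-- pv_equiv track=rewrite | github.com/jeanmicheldanto-boop/ingest-habitat | scripts/enrich_prospection_gt50.py | is_generic_email
-- ===== SOURCE A (Python) =====
-- GENERIC_LOCALPARTS = {
--     "contact",
--     "info",
--     "accueil",
--     "secretariat",
--     "secretariat",
--     "direction",
--     "siege",
--     "siege",
--     "communication",
--     "presse",
--     "recrutement",
--     "rh",
--     "ressourceshumaines",
--     "dpo",
--     "rgpd",
--     "webmaster",
--     "support",
--     "administration",
-- }
--
-- EXCLUDED_DOMAINS = {
--     "essentiel-autonomie.com",
--     "papyhappy.com",
--     "pour-les-personnes-agees.gouv.fr",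
--     "retraiteplus.fr",
--     "logement-seniors.com",
--     "capresidencesseniors.com",
--     "capgeris.com",
--     "france-maison-de-retraite.org",
--     "lesmaisonsderetraite.fr",
--     "ascellianceresidence.fr",
--     "ascelliance-retraite.fr",
--     "conseildependance.fr",
--     "tarif-senior.com",
--     "pagesjaunes.fr",
--     "mappy.com",
--
--     # Company directories / registries (useful for verification, but not official websites)
--     "annuaire-entreprises.data.gouv.fr",
--     "pappers.fr",
--     "societe.com",
--     "manageo.fr",
--     "verif.com",
--     "infogreffe.fr",
--     "bilansgratuits.fr",
--     "entreprises.lefigaro.fr",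
--
--     # Other directories / job boards / institutional directories
--     "carrefoursemploi.org",
--     "etablissements.fhf.fr",
-- }
--
-- def is_generic_email(email: str) -> bool:
--     email = (email or "").strip().lower()
--     if not email or "@" not in email:
--         return False
--     local, domain = email.split("@", 1)
--
--     # Reject obvious aggregator domains
--     if any(domain.endswith(d) for d in EXCLUDED_DOMAINS):
--         return False
--
--     # Accept a curated list of generic inboxes
--     local_clean = local.replace("-", "").replace("_", "").replace(".", "")
--     if local_clean in {p.replace("-", "").replace("_", "").replace(".", "") for p in GENERIC_LOCALPARTS}:
--         return True
--
--     # Also accept common variants like contact.<something>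
--     for prefix in GENERIC_LOCALPARTS:
--         if local.startswith(prefix + ".") or local.startswith(prefix + "-") or local.startswith(prefix + "_"):
--             return True
--
--     return False
-- ===== SOURCE B (Python) =====
-- GENERIC_LOCALPARTS = {
--     "contact",
--     "info",
--     "accueil",
--     "secretariat",
--     "secretariat",
--     "direction",
--     "siege",
--     "siege",
--     "communication",
--     "presse",
--     "recrutement",
--     "rh",
--     "ressourceshumaines",
--     "dpo",
--     "rgpd",
--     "webmaster",
--     "support",
--     "administration",
-- }
--
-- EXCLUDED_DOMAINS = {
--     "essentiel-autonomie.com",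
--     "papyhappy.com",
--     "pour-les-personnes-agees.gouv.fr",
--     "retraiteplus.fr",
--     "logement-seniors.com",
--     "capresidencesseniors.com",
--     "capgeris.com",
--     "france-maison-de-retraite.org",
--     "lesmaisonsderetraite.fr",
--     "ascellianceresidence.fr",
--     "ascelliance-retraite.fr",
--     "conseildependance.fr",
--     "tarif-senior.com",
--     "pagesjaunes.fr",
--     "mappy.com",
--     "annuaire-entreprises.data.gouv.fr",
--     "pappers.fr",
--     "societe.com",
--     "manageo.fr",
--     "verif.com",
--     "infogreffe.fr",
--     "bilansgratuits.fr",
--     "entreprises.lefigaro.fr",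
--     "carrefoursemploi.org",
--     "etablissements.fhf.fr",
-- }
--
--
-- def is_generic_email(email: str) -> bool:
--     # The generic localparts contain no '.', '-' or '_', so the cleaned
--     # comprehension set equals GENERIC_LOCALPARTS itself, and a prefix match
--     # "prefix + sep" means exactly: the part of local before its FIRST
--     # separator is a generic localpart.
--     email = (email or "").strip().lower()
--     if "@" not in email:        # also rejects the empty string
--         return False
--     local, domain = email.split("@", 1)
--     if any(domain.endswith(d) for d in EXCLUDED_DOMAINS):
--         return False
--     if local.replace("-", "").replace("_", "").replace(".", "") in GENERIC_LOCALPARTS: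
--         return True
--     for i, ch in enumerate(local):
--         if ch in ".-_":
--             return local[:i] in GENERIC_LOCALPARTS
--     return False
-- ===== Notes on version B (the rewrite author's own statement) =====
-- stated objective: simpler
-- what changed: A's loop over all generic localparts testing three startswith variants each is replaced by a single scan of the local part for its earliest separator ('.', '-' or '_') followed by one set lookup of that head, and the cleaned-localpart check looks up GENERIC_LOCALPARTS directly since its entries contain no separators.
import Mathlib
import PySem

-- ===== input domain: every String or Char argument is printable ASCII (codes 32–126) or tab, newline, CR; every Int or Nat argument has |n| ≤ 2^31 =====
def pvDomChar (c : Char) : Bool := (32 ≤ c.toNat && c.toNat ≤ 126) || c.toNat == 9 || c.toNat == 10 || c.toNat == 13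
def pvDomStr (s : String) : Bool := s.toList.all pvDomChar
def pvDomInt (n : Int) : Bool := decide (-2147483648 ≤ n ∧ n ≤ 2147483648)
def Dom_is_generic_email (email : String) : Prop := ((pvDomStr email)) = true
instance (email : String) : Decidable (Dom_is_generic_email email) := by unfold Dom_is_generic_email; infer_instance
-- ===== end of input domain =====

-- B replaces A's scan over all generic prefixes (three startswith tests each) by one
-- scan of the local part up to its first separator plus a single set lookup (objective: simpler).

-- ===== PORT A =====
def pvGenericLocalparts : PySem.Set String := PySem.Set.ofList
  ["contact", "info", "accueil", "secretariat", "secretariat", "direction", "siege",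
   "siege", "communication", "presse", "recrutement", "rh", "ressourceshumaines",
   "dpo", "rgpd", "webmaster", "support", "administration"]

def pvExcludedDomains : PySem.Set String := PySem.Set.ofList
  ["essentiel-autonomie.com", "papyhappy.com", "pour-les-personnes-agees.gouv.fr",
   "retraiteplus.fr", "logement-seniors.com", "capresidencesseniors.com", "capgeris.com",
   "france-maison-de-retraite.org", "lesmaisonsderetraite.fr", "ascellianceresidence.fr",
   "ascelliance-retraite.fr", "conseildependance.fr", "tarif-senior.com", "pagesjaunes.fr",
   "mappy.com", "annuaire-entreprises.data.gouv.fr", "pappers.fr", "societe.com",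
   "manageo.fr", "verif.com", "infogreffe.fr", "bilansgratuits.fr",
   "entreprises.lefigaro.fr", "carrefoursemploi.org", "etablissements.fhf.fr"]

-- local.replace("-", "").replace("_", "").replace(".", "")
def pvCleanLocal (s : String) : String :=
  PySem.Str.replace (PySem.Str.replace (PySem.Str.replace s "-" "") "_" "") "." ""

def is_generic_email (email : String) : Bool :=
  let e := PySem.Str.lower (PySem.Str.strip email)
  if e == "" || !(PySem.Str.isIn "@" e) then false
  else
    match PySem.Str.splitMax? e "@" 1 with
    | some (lcl :: domain :: _) =>
      if pvExcludedDomains.any (fun d => PySem.Str.endswith domain d) then false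
      else
        let localClean := pvCleanLocal lcl
        if PySem.Set.contains (PySem.Set.ofList (pvGenericLocalparts.map pvCleanLocal)) localClean then true
        else if pvGenericLocalparts.any (fun p =>
            PySem.Chars.startswith lcl.toList (p.toList ++ ['.']) ||
            PySem.Chars.startswith lcl.toList (p.toList ++ ['-']) ||
            PySem.Chars.startswith lcl.toList (p.toList ++ ['_'])) then true
        else false
    | _ => false

-- ===== PORT B =====
-- the chars of local before its first separator; none if local has no separator
def pvHeadTo : List Char → Option (List Char)
  | [] => none
  | c :: rest =>
      if c == '.' || c == '-' || c == '_' then some []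
      else (pvHeadTo rest).map (c :: ·)

-- local, domain = email.split("@", 1) (B-side destructuring helper)
def pvSplit2 : Option (List String) → Option (String × String)
  | none => none
  | some [] => none
  | some [_] => none
  | some (lcl :: domain :: _) => some (lcl, domain)

def is_generic_email_alt (email : String) : Bool :=
  let e := PySem.Str.lower (PySem.Str.strip email)
  if !(PySem.Str.isIn "@" e) then false
  else
    match pvSplit2 (PySem.Str.splitMax? e "@" 1) with
    | some (lcl, domain) =>
      if pvExcludedDomains.any (fun d => PySem.Str.endswith domain d) then false
      else if PySem.Set.contains pvGenericLocalparts (pvCleanLocal lcl) then true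
      else
        match pvHeadTo lcl.toList with
        | some h => PySem.Set.contains pvGenericLocalparts (String.ofList h)
        | none => false
    | none => false

-- ===== PRECONDITION & SPEC =====
def Spec_is_generic_email (email : String) (out : Bool) : Prop := out = is_generic_email_alt email
instance (email : String) (out : Bool) : Decidable (Spec_is_generic_email email out) := by unfold Spec_is_generic_email; infer_instance

-- ===== CLAIM (what is proved, stated in full; the proofs are below) =====
def Claim_equal_is_generic_email : Prop := ∀ (email : String), Dom_is_generic_email email → Spec_is_generic_email email (is_generic_email email)

-- ===== LEMMAS AND PROOFS =====

-- s.replace(old, new) is the identity when old does not occur in s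
lemma pvGo_id (old new : List Char) :
    ∀ (fuel : Nat) (l acc : List Char), ¬ old <:+: l →
      PySem.Chars.replace.go old new fuel l acc = acc.reverse ++ l := by
  intro fuel
  induction fuel with
  | zero => intro l acc _; rw [PySem.Chars.replace.go]
  | succ n ih =>
    intro l acc h
    cases l with
    | nil =>
      rw [PySem.Chars.replace.go]
      · simp
      · omega
    | cons c t =>
      rw [PySem.Chars.replace.go]
      have hpre : old.isPrefixOf (c :: t) = false := by
        rw [Bool.eq_false_iff]
        intro hx
        exact h (List.IsPrefix.isInfix (List.isPrefixOf_iff_prefix.mp hx))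
      rw [hpre]
      simp only [Bool.false_eq_true, if_false]
      rw [ih t (c :: acc) (fun hx => h (hx.trans (List.suffix_cons c t).isInfix))]
      simp

lemma pvReplace_id (s old new : List Char) (h : ¬ old <:+: s) (h2 : old ≠ []) :
    PySem.Chars.replace s old new = s := by
  rw [PySem.Chars.replace]
  rw [if_neg (by simpa [List.isEmpty_iff] using h2)]
  simpa using pvGo_id old new s.length s [] h

lemma pvStrReplace_id (s old new : String) (h : ¬ old.toList <:+: s.toList)
    (h2 : old.toList ≠ []) : PySem.Str.replace s old new = s := by
  rw [PySem.Str.replace, pvReplace_id _ _ _ h h2]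
  simp

lemma pvGen_sepFreeB : (pvGenericLocalparts.all
    (fun p => p.toList.all (fun c => !(c == '.' || c == '-' || c == '_')))) = true := by rfl

lemma pvGen_sepFree : ∀ p ∈ pvGenericLocalparts, ∀ c ∈ p.toList,
    ¬(c = '.' ∨ c = '-' ∨ c = '_') := by
  intro p hp c hc
  have h1 := List.all_eq_true.mp pvGen_sepFreeB p hp
  have h2 := List.all_eq_true.mp h1 c hc
  simp only [Bool.not_eq_eq_eq_not, Bool.not_true, Bool.or_eq_false_iff, beq_eq_false_iff_ne] at h2
  tauto

lemma pvClean_id (p : String) (hp : ∀ c ∈ p.toList, ¬(c = '.' ∨ c = '-' ∨ c = '_')) :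
    pvCleanLocal p = p := by
  have hmem : ∀ (c : Char), c = '.' ∨ c = '-' ∨ c = '_' → ¬ [c] <:+: p.toList := by
    intro c hcsep hinf
    exact hp c (hinf.subset (by simp)) hcsep
  unfold pvCleanLocal
  rw [pvStrReplace_id p "-" "" (hmem '-' (by simp)) (by decide)]
  rw [pvStrReplace_id p "_" "" (hmem '_' (by simp)) (by decide)]
  rw [pvStrReplace_id p "." "" (hmem '.' (by simp)) (by decide)]

lemma pvCleanedSet_eq :
    PySem.Set.ofList (pvGenericLocalparts.map pvCleanLocal) = pvGenericLocalparts := by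
  have hmap : pvGenericLocalparts.map pvCleanLocal = pvGenericLocalparts := by
    have := List.map_congr_left (fun p hp => pvClean_id p (pvGen_sepFree p hp))
    rw [this]; simp
  rw [hmap]
  exact PySem.Set.ofList_eq_self_of_nodup _ (PySem.Set.nodup_ofList _)

lemma pvPrefix_iff (p : List Char) (hp : ∀ c ∈ p, ¬(c = '.' ∨ c = '-' ∨ c = '_')) :
    ∀ l : List Char,
    ((PySem.Chars.startswith l (p ++ ['.']) ||
      PySem.Chars.startswith l (p ++ ['-']) ||
      PySem.Chars.startswith l (p ++ ['_'])) = true ↔ pvHeadTo l = some p) := by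
  induction p with
  | nil =>
    intro l
    cases l with
    | nil => simp [pvHeadTo, PySem.Chars.startswith_iff]
    | cons c cs =>
      by_cases hc : c = '.' ∨ c = '-' ∨ c = '_'
      · rcases hc with h1 | h1 | h1 <;> subst h1 <;>
          simp [pvHeadTo, PySem.Chars.startswith_iff, List.cons_prefix_cons]
      · push_neg at hc
        obtain ⟨h1, h2, h3⟩ := hc
        have hcond : (c == '.' || c == '-' || c == '_') = false := by
          simp [h1, h2, h3]
        simp [pvHeadTo, hcond, PySem.Chars.startswith_iff, List.cons_prefix_cons,
          Ne.symm h1, Ne.symm h2, Ne.symm h3]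
  | cons a p' ih =>
    intro l
    have ha := hp a (by simp)
    push_neg at ha
    obtain ⟨ha1, ha2, ha3⟩ := ha
    have hp' : ∀ c ∈ p', ¬(c = '.' ∨ c = '-' ∨ c = '_') := fun c hc => hp c (by simp [hc])
    cases l with
    | nil => simp [pvHeadTo, PySem.Chars.startswith_iff]
    | cons c cs =>
      have ihcs := ih hp' cs
      by_cases hc : c = '.' ∨ c = '-' ∨ c = '_'
      · rcases hc with h1 | h1 | h1 <;> subst h1 <;>
          simp [pvHeadTo, PySem.Chars.startswith_iff, List.cons_prefix_cons,
            ha1, ha2, ha3]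
      · push_neg at hc
        obtain ⟨h1, h2, h3⟩ := hc
        have hcond : (c == '.' || c == '-' || c == '_') = false := by
          simp [h1, h2, h3]
        simp only [Bool.or_eq_true, PySem.Chars.startswith_iff, List.cons_append,
          List.cons_prefix_cons, pvHeadTo, hcond, Bool.false_eq_true, if_false,
          Option.map_eq_some_iff] at *
        constructor
        · rintro ((⟨hac, hx⟩ | ⟨hac, hx⟩) | ⟨hac, hx⟩) <;>
            exact ⟨p', ihcs.mp (by tauto), by rw [hac]⟩
        · rintro ⟨x, hx, he⟩
          injection he with hca hxp
          subst hca; subst hxp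
          have := ihcs.mpr hx
          tauto

lemma pvCore (l : List Char) :
    (pvGenericLocalparts.any (fun p =>
        PySem.Chars.startswith l (p.toList ++ ['.']) ||
        PySem.Chars.startswith l (p.toList ++ ['-']) ||
        PySem.Chars.startswith l (p.toList ++ ['_']))) =
    (match pvHeadTo l with
     | some h => PySem.Set.contains pvGenericLocalparts (String.ofList h)
     | none => false) := by
  cases hl : pvHeadTo l with
  | none =>
    simp only []
    rw [List.any_eq_false]
    intro p hp
    simp only [Bool.not_eq_true]
    rw [Bool.eq_false_iff]
    intro habs
    have := (pvPrefix_iff p.toList (pvGen_sepFree p hp) l).mp habs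
    rw [hl] at this; simp at this
  | some h =>
    simp only []
    rw [Bool.eq_iff_iff, List.any_eq_true, PySem.Set.contains_iff]
    constructor
    · rintro ⟨p, hp, hpred⟩
      have := (pvPrefix_iff p.toList (pvGen_sepFree p hp) l).mp hpred
      rw [hl] at this
      injection this with hh
      have hps : String.ofList h = p := by subst hh; simp
      rw [hps]; exact hp
    · intro hmem
      refine ⟨String.ofList h, hmem, ?_⟩
      refine (pvPrefix_iff (String.ofList h).toList (pvGen_sepFree _ hmem) l).mpr ?_
      simpa using hl

-- ===== VERDICT (by name: the statement is the Claim_ definition above) =====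
set_option maxHeartbeats 1000000 in
theorem is_generic_email_spec : Claim_equal_is_generic_email := by
  intro email _
  unfold Spec_is_generic_email
  simp only [is_generic_email, is_generic_email_alt]
  generalize PySem.Str.lower (PySem.Str.strip email) = e
  by_cases h0 : e == ""
  · have h0' : e = "" := by simpa using h0
    rw [h0']; rfl
  · have h0f : (e == "") = false := by simpa using h0
    rw [h0f]
    simp only [Bool.false_or]
    by_cases hin : PySem.Str.isIn "@" e = true
    · rw [hin]
      simp only [Bool.not_true, Bool.false_eq_true, if_false]
      cases hs : PySem.Str.splitMax? e "@" 1 with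
      | none => rfl
      | some parts =>
        cases parts with
        | nil => rfl
        | cons lcl rest =>
          cases rest with
          | nil => rfl
          | cons domain rest' =>
            simp only [pvSplit2]
            by_cases hex : pvExcludedDomains.any (fun d => PySem.Str.endswith domain d) = true
            · rw [hex]; simp only [reduceIte]
            · rw [Bool.eq_false_iff.mpr hex]
              simp only [Bool.false_eq_true, if_false, pvCleanedSet_eq]
              by_cases hcl : PySem.Set.contains pvGenericLocalparts (pvCleanLocal lcl) = true
              · rw [hcl]; simp only [reduceIte]
              · rw [Bool.eq_false_iff.mpr hcl]
                simp only [Bool.false_eq_true, if_false]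
                have hb : ∀ (b c : Bool), b = c → (if b = true then true else false) = c := by
                  intro b c h; subst h; cases b <;> rfl
                exact hb _ _ (pvCore lcl.toList)
    · rw [Bool.eq_false_iff.mpr hin]
      simp
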